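-- pv_equiv track=rewrite | github.com/ndss2021Submission91/ndss2021-91 | SPAggregator/SPAggregator.py | parse_csp
-- ===== SOURCE A (Python) =====
-- def parse_csp(csp_string):
--     """
--     Takes a CSP string and parses it according to the specification
--     :param csp_string: CSP to parse
--     :return: dictionary with the directives and their values
--     """
--     # Let policy be a new policy with an empty directive set
--     complete_policy = {}
--     # For each token returned by splitting list on commas
--     for policy_string in csp_string.lower().split(','):
--         # Let policy be a new policy with an empty directive set
--         policy = dict()
--         # For each token returned by strictly splitting serialized on the U+003B SEMICOLON character (;):
--         tokens = policy_string.split(';')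
--         for token in tokens:
--             # Strip all leading and trailing ASCII whitespace from token.
--             data = token.strip().split()
--             # If token is an empty string, continue.
--             if len(data) == 0:
--                 continue
--             # Let directive name be the result of collecting a sequence of code points from token which are not ASCII
--             # whitespace.
--             while data[0] == ' ':
--                 data = data[1:]
--                 if len(data) == 0:
--                     break
--             # If token is an empty string, continue.
--             if len(data) == 0:
--                 continue
--             # Set directive name to be the result of running ASCII lowercase on directive name.
--             directive_name = data[0]
--             # If policy's directive set contains a directive whose name is directive name, continue.
--             if directive_name in policy:
--                 continue
--             # Let directive value be the result of splitting token on ASCII whitespace.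
--             directive_set = set()
--             for d in data[1:]:
--                 if d.strip() != '':
--                     directive_set.add(d)
--             # Append directive to policy's directive set.
--             policy[directive_name] = directive_set
--         for name in policy:
--             if name in complete_policy:
--                 if complete_policy[name] != policy[name]:
--                     inter_sec = complete_policy[name].intersection(policy[name])
--                     complete_policy[name] = inter_sec
--                     continue
--             complete_policy[name] = policy[name]
--     # Return policy.
--     return complete_policy
-- ===== SOURCE B (Python) =====
-- def parse_csp(csp_string):
--     """
--     Takes a CSP string and parses it according to the specification
--     :param csp_string: CSP to parse
--     :return: dictionary with the directives and their values
--     """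
--     # Flatten the whole CSP into an ordered list of directive definitions:
--     # one (name, dedup value list) per policy and per first occurrence of name in it.
--     defs = []
--     for policy_string in csp_string.lower().split(','):
--         seen = set()
--         for token in policy_string.split(';'):
--             parts = token.strip().split()
--             if parts and parts[0] not in seen:
--                 seen.add(parts[0])
--                 defs.append((parts[0], list(dict.fromkeys(parts[1:]))))
--     # Count definitions per name and occurrences per (name, value).
--     occ = {}
--     cnt = {}
--     first = {}
--     for name, vals in defs:
--         occ[name] = occ.get(name, 0) + 1
--         first.setdefault(name, vals)
--         for v in vals:
--             cnt[name, v] = cnt.get((name, v), 0) + 1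
--     # A value survives iff it occurs in every definition of its directive.
--     return {name: {v for v in vals if cnt[name, v] == occ[name]}
--             for name, vals in first.items()}
-- ===== Notes on version B (the rewrite author's own statement) =====
-- stated objective: alternative
-- what changed: A parses each policy into a dict of token sets and folds them into the result with incremental set.intersection per directive; B never intersects sets: it flattens the CSP into an ordered list of (name, token-list) definitions, counts definitions per name and occurrences per (name, value), and keeps a value of a name's first definition iff its count equals the definition count.
import Mathlib
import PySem

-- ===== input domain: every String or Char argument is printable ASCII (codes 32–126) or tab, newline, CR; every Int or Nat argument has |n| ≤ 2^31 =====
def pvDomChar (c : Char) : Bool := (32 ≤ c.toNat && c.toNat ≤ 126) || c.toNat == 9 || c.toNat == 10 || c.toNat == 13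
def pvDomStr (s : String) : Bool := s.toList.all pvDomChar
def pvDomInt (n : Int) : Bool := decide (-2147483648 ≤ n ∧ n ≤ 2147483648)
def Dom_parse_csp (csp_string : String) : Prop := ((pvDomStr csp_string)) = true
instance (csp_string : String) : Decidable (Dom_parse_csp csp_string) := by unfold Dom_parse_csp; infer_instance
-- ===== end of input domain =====

-- B replaces A's interleaved parse-and-intersect-sets fold by a flatten-count-filter algorithm with no
-- set intersection at all (objective: alternative — a value survives iff its occurrence count equals its
-- directive's definition count).
-- The dict values are Python SETS: both ports represent them as PySem.Set lists and the set comparison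
-- in A ('complete_policy[name] != policy[name]') is taken on the representative element lists
-- (the resulting value is the same set either way, so A's port is exact up to element order inside each set).

-- ===== PORT A =====
-- while data[0] == ' ': data = data[1:]; if len(data) == 0: break   (literal port of A's loop)
def pvDropSpaces : List String → List String
  | [] => []
  | d :: rest => if d = " " then pvDropSpaces rest else d :: rest

def parse_csp (csp_string : String) : List (String × List String) :=
  -- complete_policy = {}; for policy_string in csp_string.lower().split(','):
  (((PySem.Str.split? (PySem.Str.lower csp_string) ",").getD []).foldl
    (fun complete policy_string =>
      -- policy = dict(); tokens = policy_string.split(';')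
      let tokens := (PySem.Str.split? policy_string ";").getD []   -- sep is a non-empty literal, split? = some
      let policy : PySem.Dict String (PySem.Set String) :=
        tokens.foldl (fun policy token =>
          let data := PySem.Str.split₀ (PySem.Str.strip token)     -- token.strip().split()
          if data.length = 0 then policy
          else
            let data := pvDropSpaces data
            if data.length = 0 then policy
            else
              let directive_name := data.headI                      -- data[0] (data ≠ [] here)
              if policy.contains directive_name then policy
              else
                -- directive_set = set(); for d in data[1:]: if d.strip() != '': directive_set.add(d)
                let directive_set := (data.drop 1).foldl
                  (fun s d => if PySem.Str.strip d ≠ "" then PySem.Set.add s d else s)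
                  PySem.Set.empty
                policy.insert directive_name directive_set)
          (PySem.Dict.mk [])
      -- for name in policy: merge into complete_policy
      policy.items.foldl (fun complete p =>
          if complete.contains p.1 then
            -- set (in)equality taken on the representative lists (value-identical as sets)
            if complete.getD p.1 [] ≠ p.2 then
              complete.insert p.1 (PySem.Set.inter (complete.getD p.1 []) p.2)
            else complete.insert p.1 p.2
          else complete.insert p.1 p.2)
        complete)
    (PySem.Dict.mk [])).items

-- ===== PORT B =====
def parse_csp_alt (csp_string : String) : List (String × List String) :=
  -- defs = []; for policy_string …: seen = set(); for token …: parts = token.strip().split(); …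
  let defs : List (String × List String) :=
    ((PySem.Str.split? (PySem.Str.lower csp_string) ",").getD []).foldl
      (fun defs policy_string =>
        (((PySem.Str.split? policy_string ";").getD []).foldl
          (fun (p : PySem.Set String × List (String × List String)) token =>
            match PySem.Str.split₀ (PySem.Str.strip token) with
            | [] => p
            | name :: vals =>
              if p.1.contains name then p
              -- seen.add(parts[0]); defs.append((parts[0], list(dict.fromkeys(parts[1:]))))
              else (PySem.Set.add p.1 name, p.2 ++ [(name, PySem.List.dedup vals)]))
          (PySem.Set.empty, defs)).2)
      []
  -- occ = {}; cnt = {}; first = {}; for name, vals in defs: …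
  let st := defs.foldl
    (fun (s : PySem.Dict String Int × PySem.Dict (String × String) Int × PySem.Dict String (List String)) d =>
      (s.1.insert d.1 (s.1.getD d.1 0 + 1),
       d.2.foldl (fun c v => c.insert (d.1, v) (c.getD (d.1, v) 0 + 1)) s.2.1,
       s.2.2.setdefault d.1 d.2))
    (PySem.Dict.mk [], PySem.Dict.mk [], PySem.Dict.mk [])
  -- {name: {v for v in vals if cnt[name, v] == occ[name]} for name, vals in first.items()}
  -- (cnt[name, v] and occ[name] always exist there; ported with getD 0)
  st.2.2.items.map (fun p =>
    (p.1, PySem.Set.ofList (p.2.filter (fun v => decide (st.2.1.getD (p.1, v) 0 = st.1.getD p.1 0)))))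

-- ===== PRECONDITION & SPEC =====
def Spec_parse_csp (csp_string : String) (out : List (String × List String)) : Prop := out = parse_csp_alt csp_string
instance (csp_string : String) (out : List (String × List String)) : Decidable (Spec_parse_csp csp_string out) := by unfold Spec_parse_csp; infer_instance

-- ===== CLAIM (what is proved, stated in full; the proofs are below) =====
def Claim_equal_parse_csp : Prop := ∀ (csp_string : String), Dom_parse_csp csp_string → Spec_parse_csp csp_string (parse_csp csp_string)

-- ===== LEMMAS AND PROOFS =====

-- proof-only names for the two ports' loop bodies
def pvTokA (policy : PySem.Dict String (PySem.Set String)) (token : String) :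
    PySem.Dict String (PySem.Set String) :=
  let data := PySem.Str.split₀ (PySem.Str.strip token)
  if data.length = 0 then policy
  else
    let data := pvDropSpaces data
    if data.length = 0 then policy
    else
      let directive_name := data.headI
      if policy.contains directive_name then policy
      else
        let directive_set := (data.drop 1).foldl
          (fun s d => if PySem.Str.strip d ≠ "" then PySem.Set.add s d else s)
          PySem.Set.empty
        policy.insert directive_name directive_set

def pvTokB (policy : PySem.Dict String (PySem.Set String)) (token : String) :
    PySem.Dict String (PySem.Set String) :=
  match PySem.Str.split₀ (PySem.Str.strip token) with
  | [] => policy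
  | name :: values => policy.setdefault name (PySem.Set.ofList values)

def pvMergeA (complete : PySem.Dict String (PySem.Set String)) (p : String × PySem.Set String) :
    PySem.Dict String (PySem.Set String) :=
  if complete.contains p.1 then
    if complete.getD p.1 [] ≠ p.2 then
      complete.insert p.1 (PySem.Set.inter (complete.getD p.1 []) p.2)
    else complete.insert p.1 p.2
  else complete.insert p.1 p.2

-- grouping model shared by both proofs: every definition's set appended under its name
def pvMergeG (g : PySem.Dict String (List (PySem.Set String))) (p : String × PySem.Set String) :
    PySem.Dict String (List (PySem.Set String)) :=
  g.modify p.1 [] (· ++ [p.2])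

def pvStepB (p : PySem.Set String × List (String × List String)) (token : String) :
    PySem.Set String × List (String × List String) :=
  match PySem.Str.split₀ (PySem.Str.strip token) with
  | [] => p
  | name :: vals =>
    if p.1.contains name then p
    else (PySem.Set.add p.1 name, p.2 ++ [(name, PySem.List.dedup vals)])

def pvCount
    (s : PySem.Dict String Int × PySem.Dict (String × String) Int × PySem.Dict String (List String))
    (d : String × List String) :
    PySem.Dict String Int × PySem.Dict (String × String) Int × PySem.Dict String (List String) :=
  (s.1.insert d.1 (s.1.getD d.1 0 + 1),
   d.2.foldl (fun c v => c.insert (d.1, v) (c.getD (d.1, v) 0 + 1)) s.2.1,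
   s.2.2.setdefault d.1 d.2)

-- iterated intersection (the fold A effectively performs on each name's list of sets)
def pvReduceInter (sets : List (PySem.Set String)) : PySem.Set String :=
  match sets with
  | [] => []
  | s :: rest => rest.foldl PySem.Set.inter s

def pvF (p : String × List (PySem.Set String)) : String × List String := (p.1, pvReduceInter p.2)

-- the invariant tying B's three dicts to the grouping model g
def pvInv
    (st : PySem.Dict String Int × PySem.Dict (String × String) Int × PySem.Dict String (List String))
    (g : PySem.Dict String (List (PySem.Set String))) : Prop :=
  st.2.2.items = g.items.map (fun q => (q.1, q.2.headI)) ∧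
  (∀ n, st.1.getD n 0 = ((g.getD n []).length : Int)) ∧
  (∀ n v, st.2.1.getD (n, v) 0 = (((g.getD n []).flatten.count v : Nat) : Int)) ∧
  (∀ q ∈ g.items, q.2 ≠ []) ∧
  g.keys.Nodup ∧
  (∀ q ∈ g.items, ∀ s ∈ q.2, s.Nodup)

-- ---- word facts about token.strip().split() (shared by the two parsers) ----
theorem pv_split₀_go_words (s : List Char) (cur : List Char) (acc : List (List Char))
    (hcur : ∀ c ∈ cur, PySem.Chars.isspace c = false)
    (hacc : ∀ w ∈ acc, w ≠ [] ∧ ∀ c ∈ w, PySem.Chars.isspace c = false) :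
    ∀ w ∈ PySem.Chars.split₀.go s cur acc, w ≠ [] ∧ ∀ c ∈ w, PySem.Chars.isspace c = false := by
  induction s generalizing cur acc with
  | nil =>
    intro w hw
    rw [PySem.Chars.split₀.go] at hw
    split at hw
    · exact hacc w (List.mem_reverse.mp hw)
    · rcases List.mem_cons.mp (List.mem_reverse.mp hw) with h | h
      · next hne =>
        subst h
        refine ⟨by simpa using List.isEmpty_eq_false_iff.mp (by simpa using hne), ?_⟩
        intro c hc; exact hcur c (List.mem_reverse.mp hc)
      · exact hacc w h
  | cons c rest ih =>
    intro w hw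
    rw [PySem.Chars.split₀.go] at hw
    split at hw
    · split at hw
      · exact ih [] acc (by simp) hacc w hw
      · next hsp hne =>
        refine ih [] (cur.reverse :: acc) (by simp) ?_ w hw
        intro u hu
        rcases List.mem_cons.mp hu with hu | hu
        · subst hu
          exact ⟨by simpa using List.isEmpty_eq_false_iff.mp (by simpa using hne),
                 fun d hd => hcur d (List.mem_reverse.mp hd)⟩
        · exact hacc u hu
    · next hsp =>
      refine ih (c :: cur) acc ?_ hacc w hw
      intro d hd
      rcases List.mem_cons.mp hd with hd | hd
      · simpa [hd] using hsp
      · exact hcur d hd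

theorem pv_word_props (t w : String) (hw : w ∈ PySem.Str.split₀ t) :
    w ≠ "" ∧ w ≠ " " ∧ PySem.Str.strip w = w := by
  rcases List.mem_map.mp (by simpa [PySem.Str.split₀] using hw) with ⟨l, hl, rfl⟩
  have hp := pv_split₀_go_words t.toList [] [] (by simp) (by simp) l hl
  have htl : (String.ofList l).toList = l := String.toList_ofList
  refine ⟨?_, ?_, ?_⟩
  · intro h
    exact hp.1 (by simpa using congrArg String.toList h)
  · intro h
    have : l = [' '] := by simpa using (congrArg String.toList h.symm).symm
    have := hp.2 ' ' (by simp [this])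
    simp [PySem.Chars.isspace] at this
  · have hds : ∀ (m : List Char), (∀ c ∈ m, PySem.Chars.isspace c = false) →
        m.dropWhile PySem.Chars.isspace = m := by
      intro m hm
      rw [List.dropWhile_eq_self_iff]
      intro hlen h
      have := hm m[0] (List.getElem_mem hlen)
      rw [this] at h
      exact Bool.false_ne_true h
    have h1 : PySem.Chars.strip l = l := by
      unfold PySem.Chars.strip PySem.Chars.lstrip PySem.Chars.rstrip
      rw [hds l hp.2, hds l.reverse (fun c hc => hp.2 c (List.mem_reverse.mp hc)), List.reverse_reverse]
    simp [PySem.Str.strip, htl, h1]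

theorem pvTok_eq : pvTokA = pvTokB := by
  funext policy token
  unfold pvTokA pvTokB
  cases hd : PySem.Str.split₀ (PySem.Str.strip token) with
  | nil => simp
  | cons name values =>
    have hname := pv_word_props _ name (hd ▸ List.mem_cons_self)
    have hvals : ∀ d ∈ values, PySem.Str.strip d ≠ "" := by
      intro d hdm
      have := pv_word_props _ d (hd ▸ List.mem_cons_of_mem _ hdm)
      rw [this.2.2]; exact this.1
    have hds : pvDropSpaces (name :: values) = name :: values := by
      simp [pvDropSpaces, hname.2.1]
    simp only [hds, List.length_cons, Nat.succ_ne_zero, if_false, List.headI, List.drop_one,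
      List.tail_cons]
    by_cases hc : policy.contains name
    · simp [hc, PySem.Dict.setdefault_of_contains _ _ hc]
    · rw [if_neg (by simp [hc]), PySem.Dict.setdefault_of_not_contains _ _ (by simpa using hc)]
      congr 1
      rw [PySem.Set.ofList_eq_foldl]
      refine PySem.List.foldl_congr_mem values _ _ _ (fun acc x hx => ?_)
      simp [hvals x hx]

-- ---- A's merge fold vs the grouping model ----
theorem pv_inter_self (v : PySem.Set String) : PySem.Set.inter v v = v := by
  unfold PySem.Set.inter
  rw [List.filter_eq_self]
  intro a ha
  exact (PySem.Set.contains_iff v a).mpr ha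

theorem pv_merge_inv (d : PySem.Dict String (PySem.Set String))
    (g : PySem.Dict String (List (PySem.Set String))) (p : String × PySem.Set String)
    (h1 : d.items = g.items.map pvF) (h2 : ∀ q ∈ g.items, q.2 ≠ []) :
    (pvMergeA d p).items = (pvMergeG g p).items.map pvF ∧
      ∀ q ∈ (pvMergeG g p).items, q.2 ≠ [] := by
  obtain ⟨name, st⟩ := p
  have hc : d.contains name = g.contains name := by
    simp only [PySem.Dict.contains, h1, List.any_map]
    rfl
  have hget : d.get? name = (g.get? name).map pvReduceInter := by
    simp only [PySem.Dict.get?, h1, List.find?_map]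
    have hcomp : ((fun p : String × List String => p.1 == name) ∘ pvF) =
        (fun q : String × List (PySem.Set String) => q.1 == name) := rfl
    rw [hcomp]
    cases List.find? (fun q : String × List (PySem.Set String) => q.1 == name) g.items <;> rfl
  by_cases hcon : g.contains name = true
  · -- name present on both sides
    obtain ⟨sets0, hsets0⟩ : ∃ v, g.get? name = some v := by
      cases hg : g.get? name with
      | none => exact absurd ((PySem.Dict.get?_eq_none_iff_contains g name).mp hg) (by simp [hcon])
      | some v => exact ⟨v, rfl⟩
    have hmem : (name, sets0) ∈ g.items := PySem.Dict.mem_items_of_get?_eq_some g hsets0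
    have hne0 : sets0 ≠ [] := h2 _ hmem
    have hv0 : d.getD name [] = pvReduceInter sets0 := by
      rw [PySem.Dict.getD_eq_get?_getD, hget, hsets0]; rfl
    have hred : pvReduceInter (sets0 ++ [st]) = PySem.Set.inter (pvReduceInter sets0) st := by
      obtain ⟨s0, rest, rfl⟩ : ∃ a l, sets0 = a :: l := by
        cases sets0 with
        | nil => exact absurd rfl hne0
        | cons a l => exact ⟨a, l, rfl⟩
      simp [pvReduceInter, List.foldl_append]
    have hBitems : (pvMergeG g (name, st)).items =
        g.items.map (fun q => if q.1 == name then (name, sets0 ++ [st]) else q) := by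
      unfold pvMergeG PySem.Dict.modify
      rw [PySem.Dict.getD_eq_get?_getD, hsets0]
      exact PySem.Dict.items_insert_of_contains g _ hcon
    have hA : pvMergeA d (name, st) = d.insert name (PySem.Set.inter (pvReduceInter sets0) st) := by
      unfold pvMergeA
      simp only [hc, hcon, if_true, hv0]
      by_cases hst : pvReduceInter sets0 = st
      · rw [if_neg (by simp [hst])]
        conv_rhs => rw [← hst, pv_inter_self]
        rw [hst]
      · rw [if_pos (by simp [hst])]
    constructor
    · rw [hA, PySem.Dict.items_insert_of_contains d _ (hc ▸ hcon), h1, hBitems,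
        List.map_map, List.map_map]
      refine List.map_congr_left ?_
      intro q hq
      by_cases hqn : q.1 = name
      · simp [Function.comp, pvF, hqn, hred]
      · simp [Function.comp, pvF, hqn]
    · intro q hq
      rw [hBitems] at hq
      rcases List.mem_map.mp hq with ⟨q0, hq0, rfl⟩
      by_cases hqn : q0.1 = name
      · simp [hqn]
      · simpa [hqn] using h2 q0 hq0
  · -- name fresh on both sides
    have hcf : d.contains name = false := by rw [hc]; simpa using hcon
    have hA : pvMergeA d (name, st) = d.insert name st := by
      unfold pvMergeA
      simp [hcf]
    have hB : pvMergeG g (name, st) = g.insert name [st] := by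
      unfold pvMergeG PySem.Dict.modify
      simp only
      rw [PySem.Dict.getD_of_not_contains g _ (by simpa using hcon)]
      simp
    constructor
    · rw [hA, hB, PySem.Dict.items_insert_of_not_contains d _ hcf,
        PySem.Dict.items_insert_of_not_contains g _ (by simpa using hcon), List.map_append, h1]
      rfl
    · intro q hq
      rw [hB, PySem.Dict.items_insert_of_not_contains g _ (by simpa using hcon)] at hq
      rcases List.mem_append.mp hq with h | h
      · exact h2 q h
      · simp at h; simp [h]

theorem pv_fold_merge_inv (l : List (String × PySem.Set String))
    (d : PySem.Dict String (PySem.Set String)) (g : PySem.Dict String (List (PySem.Set String)))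
    (h1 : d.items = g.items.map pvF) (h2 : ∀ q ∈ g.items, q.2 ≠ []) :
    (l.foldl pvMergeA d).items = (l.foldl pvMergeG g).items.map pvF ∧
      ∀ q ∈ (l.foldl pvMergeG g).items, q.2 ≠ [] := by
  induction l generalizing d g with
  | nil => exact ⟨h1, h2⟩
  | cons p rest ih =>
    have h := pv_merge_inv d g p h1 h2
    exact ih _ _ h.1 h.2

-- ---- B's flattening pass vs per-policy dicts ----
theorem pvStepB_nil (p : PySem.Set String × List (String × List String)) (t : String)
    (h : PySem.Str.split₀ (PySem.Str.strip t) = []) : pvStepB p t = p := by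
  simp only [pvStepB, h]

theorem pvStepB_cons (p : PySem.Set String × List (String × List String)) (t : String)
    (name : String) (vals : List String)
    (h : PySem.Str.split₀ (PySem.Str.strip t) = name :: vals) :
    pvStepB p t =
      if p.1.contains name then p
      else (PySem.Set.add p.1 name, p.2 ++ [(name, PySem.List.dedup vals)]) := by
  simp only [pvStepB, h]

theorem pvTokB_nil (d : PySem.Dict String (PySem.Set String)) (t : String)
    (h : PySem.Str.split₀ (PySem.Str.strip t) = []) : pvTokB d t = d := by
  simp only [pvTokB, h]

theorem pvTokB_cons (d : PySem.Dict String (PySem.Set String)) (t : String)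
    (name : String) (vals : List String)
    (h : PySem.Str.split₀ (PySem.Str.strip t) = name :: vals) :
    pvTokB d t = d.setdefault name (PySem.Set.ofList vals) := by
  simp only [pvTokB, h]

theorem pv_step_shift (tokens : List String) (seen : PySem.Set String)
    (acc1 acc2 : List (String × List String)) :
    tokens.foldl pvStepB (seen, acc1 ++ acc2) =
      ((tokens.foldl pvStepB (seen, acc2)).1, acc1 ++ (tokens.foldl pvStepB (seen, acc2)).2) := by
  induction tokens generalizing seen acc2 with
  | nil => rfl
  | cons t rest ih =>
    simp only [List.foldl_cons]
    cases hd : PySem.Str.split₀ (PySem.Str.strip t) with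
    | nil =>
      rw [pvStepB_nil _ _ hd, pvStepB_nil _ _ hd]
      exact ih seen acc2
    | cons name vals =>
      rw [pvStepB_cons _ _ _ _ hd, pvStepB_cons _ _ _ _ hd]
      by_cases hc : seen.contains name
      · simp only [hc, if_true]
        exact ih seen acc2
      · simp only [hc, Bool.false_eq_true, if_false, List.append_assoc]
        exact ih _ _

theorem pv_step_items (tokens : List String) (seen : PySem.Set String)
    (d : PySem.Dict String (PySem.Set String))
    (hinv : ∀ n, seen.contains n = d.contains n) :
    (tokens.foldl pvStepB (seen, d.items)).2 = (tokens.foldl pvTokB d).items := by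
  induction tokens generalizing seen d with
  | nil => rfl
  | cons t rest ih =>
    simp only [List.foldl_cons]
    cases hd : PySem.Str.split₀ (PySem.Str.strip t) with
    | nil =>
      rw [pvStepB_nil _ _ hd, pvTokB_nil _ _ hd]
      exact ih seen d hinv
    | cons name vals =>
      rw [pvStepB_cons _ _ _ _ hd, pvTokB_cons _ _ _ _ hd]
      by_cases hc : d.contains name
      · rw [PySem.Dict.setdefault_of_contains _ _ hc]
        simp only [hinv name, hc, if_true]
        exact ih seen d hinv
      · rw [PySem.Dict.setdefault_of_not_contains _ _ (by simpa using hc)]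
        simp only [hinv name, hc, Bool.false_eq_true, if_false]
        rw [show PySem.List.dedup vals = PySem.Set.ofList vals from PySem.List.dedup_eq_ofList vals,
          ← PySem.Dict.items_insert_of_not_contains d (PySem.Set.ofList vals) (by simpa using hc)]
        refine ih _ _ ?_
        intro n
        rw [PySem.Dict.contains_insert]
        by_cases hn : n = name
        · subst hn
          simp [PySem.Set.mem_add]
        · have : (n == name) = false := by simpa using hn
          rw [this, Bool.false_or, ← hinv n]
          apply Bool.coe_iff_coe.mp
          rw [PySem.Set.contains_iff, PySem.Set.contains_iff, PySem.Set.mem_add]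
          exact ⟨fun h => h.resolve_right hn, Or.inl⟩

theorem pv_tokB_nodup (tokens : List String) (d : PySem.Dict String (PySem.Set String))
    (h : ∀ p ∈ d.items, List.Nodup p.2) :
    ∀ p ∈ (tokens.foldl pvTokB d).items, List.Nodup p.2 := by
  induction tokens generalizing d with
  | nil => exact h
  | cons t rest ih =>
    simp only [List.foldl_cons]
    refine ih _ ?_
    cases hd : PySem.Str.split₀ (PySem.Str.strip t) with
    | nil => rw [pvTokB_nil _ _ hd]; exact h
    | cons name vals =>
      rw [pvTokB_cons _ _ _ _ hd]
      by_cases hc : d.contains name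
      · rw [PySem.Dict.setdefault_of_contains _ _ hc]; exact h
      · rw [PySem.Dict.setdefault_of_not_contains _ _ (by simpa using hc)]
        intro p hp
        rcases (PySem.Dict.mem_items_insert d _ _ p).mp hp with hp | hp
        · subst hp; exact PySem.Set.nodup_ofList vals
        · exact h p hp.1

-- ---- B's counting pass vs the grouping model ----
theorem pv_headI_append {α : Type} [Inhabited α] (l t : List α) (h : l ≠ []) : (l ++ t).headI = l.headI := by
  cases l with
  | nil => exact absurd rfl h
  | cons a l => rfl


theorem pv_count_step
    (st : PySem.Dict String Int × PySem.Dict (String × String) Int × PySem.Dict String (List String))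
    (g : PySem.Dict String (List (PySem.Set String))) (d : String × List String)
    (hnd : d.2.Nodup) (h : pvInv st g) : pvInv (pvCount st d) (pvMergeG g d) := by
  obtain ⟨n, vals⟩ := d
  obtain ⟨occ, cnt, first⟩ := st
  obtain ⟨h1, h2, h3, h4, h5, h6⟩ := h
  simp only at h1 h2 h3
  have hkeys : first.keys = g.keys := by
    show first.items.map Prod.fst = g.items.map Prod.fst
    rw [h1, List.map_map]; rfl
  have hcfc : first.contains n = g.contains n := by
    rw [PySem.Dict.contains_eq_decide_mem_keys, PySem.Dict.contains_eq_decide_mem_keys, hkeys]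
  have hcnt' : ∀ m w,
      (vals.foldl (fun c v => c.insert (n, v) (c.getD (n, v) 0 + 1)) cnt).getD (m, w) 0 =
        cnt.getD (m, w) 0 + ((if m = n then vals.count w else 0 : Nat) : Int) := by
    intro m w
    have hfm : (vals.foldl (fun c v => c.insert (n, v) (c.getD (n, v) 0 + 1)) cnt) =
        ((vals.map (fun v => (n, v))).foldl
          (fun c (y : String × String) => c.insert y (c.getD y 0 + 1)) cnt) := by
      rw [List.foldl_map]
    rw [hfm, PySem.Dict.getD_foldl_insert_add_one]
    congr 1
    by_cases hm : m = n
    · subst hm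
      simp only [if_pos rfl]
      norm_cast
      exact List.count_map_of_injective vals (fun v => (m, v)) (fun a b hab => by simpa using hab) w
    · simp only [if_neg hm]
      norm_cast
      rw [List.count_eq_zero]
      intro hmem
      rcases List.mem_map.mp hmem with ⟨v, _, hv⟩
      exact hm (congrArg Prod.fst hv).symm
  unfold pvCount pvMergeG
  simp only
  by_cases hcon : g.contains n = true
  · -- n already has definitions
    obtain ⟨sets0, hsets0⟩ : ∃ v, g.get? n = some v := by
      cases hg : g.get? n with
      | none => exact absurd ((PySem.Dict.get?_eq_none_iff_contains g n).mp hg) (by simp [hcon])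
      | some v => exact ⟨v, rfl⟩
    have hmem : (n, sets0) ∈ g.items := PySem.Dict.mem_items_of_get?_eq_some g hsets0
    have hne0 : sets0 ≠ [] := h4 _ hmem
    have hgd : g.getD n [] = sets0 := PySem.Dict.getD_of_get?_eq_some g [] hsets0
    have hitems : (g.modify n [] (· ++ [vals])).items =
        g.items.map (fun q => if q.1 == n then (n, sets0 ++ [vals]) else q) := by
      unfold PySem.Dict.modify
      rw [hgd]
      exact PySem.Dict.items_insert_of_contains g _ hcon
    have hqeq : ∀ q ∈ g.items, q.1 = n → q.2 = sets0 := by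
      intro q hq hq1
      have := PySem.Dict.get?_of_mem_items g (show (q.1, q.2) ∈ g.items from hq) h5
      rw [hq1, hsets0] at this
      exact (Option.some_inj.mp this).symm
    refine ⟨?_, ?_, ?_, ?_, ?_, ?_⟩
    · rw [PySem.Dict.setdefault_of_contains _ _ (hcfc ▸ hcon), h1, hitems, List.map_map]
      refine List.map_congr_left (fun q hq => ?_)
      by_cases hqn : q.1 = n
      · have := hqeq q hq hqn
        simp [Function.comp, hqn, this, pv_headI_append sets0 [vals] hne0]
      · simp [Function.comp, hqn]
    · intro m
      rw [PySem.Dict.getD_insert, PySem.Dict.getD_modify]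
      by_cases hm : m = n
      · subst hm; rw [if_pos rfl, if_pos rfl, h2, hgd]
        simp [List.length_append]
      · rw [if_neg hm, if_neg hm, h2]
    · intro m w
      rw [hcnt' m w, PySem.Dict.getD_modify, h3]
      by_cases hm : m = n
      · subst hm; rw [if_pos rfl, if_pos rfl, hgd]
        simp [List.flatten_append, List.count_append]
      · rw [if_neg hm, if_neg hm]
        simp [hm]
    · intro q hq
      rw [hitems] at hq
      rcases List.mem_map.mp hq with ⟨q0, hq0, rfl⟩
      by_cases hqn : q0.1 = n
      · simp [hqn]
      · simpa [hqn] using h4 q0 hq0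
    · rw [PySem.Dict.keys_modify, PySem.Dict.keys_insert_of_contains g _ hcon]
      exact h5
    · intro q hq
      rw [hitems] at hq
      rcases List.mem_map.mp hq with ⟨q0, hq0, rfl⟩
      by_cases hqn : q0.1 = n
      · rw [if_pos (show (q0.1 == n) = true by simp [hqn])]
        intro s hs
        rcases List.mem_append.mp hs with hs | hs
        · exact h6 q0 hq0 s (by rw [hqeq q0 hq0 hqn]; exact hs)
        · simp at hs; subst hs; exact hnd
      · rw [if_neg (show ¬ (q0.1 == n) = true by simp [hqn])]
        exact h6 q0 hq0
  · -- n is fresh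
    have hnotmem : n ∉ g.keys := by
      intro hmem
      exact hcon ((PySem.Dict.contains_iff_mem_keys g n).mpr hmem)
    have hB : g.modify n [] (· ++ [vals]) = g.insert n [vals] := by
      unfold PySem.Dict.modify
      rw [PySem.Dict.getD_of_not_contains g _ (by simpa using hcon)]
      simp
    have hBitems : (g.modify n [] (· ++ [vals])).items = g.items ++ [(n, [vals])] := by
      rw [hB]; exact PySem.Dict.items_insert_of_not_contains g _ (by simpa using hcon)
    refine ⟨?_, ?_, ?_, ?_, ?_, ?_⟩
    · rw [PySem.Dict.setdefault_of_not_contains _ _ (by rw [hcfc]; simpa using hcon),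
        PySem.Dict.items_insert_of_not_contains first _ (by rw [hcfc]; simpa using hcon),
        hBitems, List.map_append, h1]
      rfl
    · intro m
      rw [PySem.Dict.getD_insert, hB, PySem.Dict.getD_insert]
      by_cases hm : m = n
      · subst hm
        rw [if_pos rfl, if_pos rfl, h2, PySem.Dict.getD_of_not_contains g _ (by simpa using hcon)]
        simp
      · rw [if_neg hm, if_neg hm, h2]
    · intro m w
      rw [hcnt' m w, hB, PySem.Dict.getD_insert, h3]
      by_cases hm : m = n
      · subst hm
        rw [if_pos rfl, if_pos rfl, PySem.Dict.getD_of_not_contains g _ (by simpa using hcon)]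
        simp
      · rw [if_neg hm, if_neg hm]
        simp [hm]
    · intro q hq
      rw [hBitems] at hq
      rcases List.mem_append.mp hq with hq | hq
      · exact h4 q hq
      · simp at hq; simp [hq]
    · rw [hB, PySem.Dict.keys_insert_of_not_contains g _ (by simpa using hcon)]
      exact List.Nodup.append h5 (List.nodup_singleton n) (by simpa using hnotmem)
    · intro q hq
      rw [hBitems] at hq
      rcases List.mem_append.mp hq with hq | hq
      · exact h6 q hq
      · simp at hq
        subst hq
        intro s hs
        simp at hs
        subst hs
        exact hnd

theorem pv_count_fold (defs : List (String × List String))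
    (st : PySem.Dict String Int × PySem.Dict (String × String) Int × PySem.Dict String (List String))
    (g : PySem.Dict String (List (PySem.Set String)))
    (hnd : ∀ p ∈ defs, List.Nodup p.2) (h : pvInv st g) :
    pvInv (defs.foldl pvCount st) (defs.foldl pvMergeG g) := by
  induction defs generalizing st g with
  | nil => exact h
  | cons d rest ih =>
    exact ih _ _ (fun p hp => hnd p (List.mem_cons_of_mem d hp))
      (pv_count_step st g d (hnd d List.mem_cons_self) h)

-- ---- counting characterises iterated intersection ----
theorem pv_foldl_inter (rest : List (PySem.Set String)) (s0 : PySem.Set String) :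
    rest.foldl PySem.Set.inter s0 = s0.filter (fun v => rest.all (fun s => s.contains v)) := by
  induction rest generalizing s0 with
  | nil => simp
  | cons t rest ih =>
    rw [List.foldl_cons, ih]
    show (PySem.Set.inter s0 t).filter _ = _
    unfold PySem.Set.inter
    rw [List.filter_filter]
    refine List.filter_congr (fun v _ => ?_)
    simp [Bool.and_comm]

theorem pv_all_eq_one (l : List Nat) (h1 : ∀ x ∈ l, x ≤ 1) (h2 : l.sum = l.length) :
    ∀ x ∈ l, x = 1 := by
  induction l with
  | nil => intro x hx; cases hx
  | cons a rest ih =>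
    have hs : rest.sum ≤ rest.length := by
      calc rest.sum ≤ rest.length • 1 :=
            List.sum_le_card_nsmul rest 1 (fun x hx => h1 x (List.mem_cons_of_mem a hx))
        _ = rest.length := by simp
    have ha := h1 a List.mem_cons_self
    simp only [List.sum_cons, List.length_cons] at h2
    intro x hx
    rcases List.mem_cons.mp hx with rfl | hx
    · omega
    · exact ih (fun y hy => h1 y (List.mem_cons_of_mem a hy)) (by omega) x hx

theorem pv_count_filter (sets : List (PySem.Set String)) (hne : sets ≠ [])
    (hnd : ∀ s ∈ sets, List.Nodup s) :
    pvReduceInter sets =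
      sets.headI.filter (fun v => decide ((sets.flatten.count v : Nat) = sets.length)) := by
  obtain ⟨s0, rest, rfl⟩ : ∃ a l, sets = a :: l := by
    cases sets with
    | nil => exact absurd rfl hne
    | cons a l => exact ⟨a, l, rfl⟩
  show rest.foldl PySem.Set.inter s0 = _
  rw [pv_foldl_inter]
  refine List.filter_congr (fun v hv => ?_)
  apply Bool.coe_iff_coe.mp
  rw [List.all_eq_true]
  simp only [decide_eq_true_eq]
  have hs0 : s0.count v = 1 :=
    List.count_eq_one_of_mem (hnd s0 List.mem_cons_self) hv
  have hle : ∀ s ∈ rest, s.count v ≤ 1 := by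
    intro s hs
    exact List.nodup_iff_count_le_one.mp (hnd s (List.mem_cons_of_mem s0 hs)) v
  constructor
  · intro h
    have : ∀ s ∈ rest, List.count v s = 1 := by
      intro s hs
      refine List.count_eq_one_of_mem (hnd s (List.mem_cons_of_mem s0 hs)) ?_
      rw [← PySem.Set.contains_iff]
      exact h s hs
    simp only [List.flatten_cons, List.count_append, hs0, List.length_cons, List.count_flatten]
    rw [List.map_congr_left this]
    simp
    omega
  · intro h
    simp only [List.flatten_cons, List.count_append, hs0, List.length_cons,
      List.count_flatten] at h
    have hsum : (rest.map (List.count v)).sum = (rest.map (List.count v)).length := by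
      rw [List.length_map]; omega
    have hone := pv_all_eq_one _ (by
      intro x hx
      rcases List.mem_map.mp hx with ⟨s, hs, rfl⟩
      exact hle s hs) hsum
    intro s hs
    rw [PySem.Set.contains_iff, ← List.count_pos_iff]
    have := hone (List.count v s) (List.mem_map.mpr ⟨s, hs, rfl⟩)
    omega

-- ---- final pass: B's comprehension over first.items is exactly the per-name intersections ----
theorem pv_final
    (st : PySem.Dict String Int × PySem.Dict (String × String) Int × PySem.Dict String (List String))
    (g : PySem.Dict String (List (PySem.Set String))) (h : pvInv st g) :
    st.2.2.items.map (fun p =>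
        (p.1, PySem.Set.ofList (p.2.filter (fun v =>
          decide (st.2.1.getD (p.1, v) 0 = st.1.getD p.1 0))))) = g.items.map pvF := by
  obtain ⟨h1, h2, h3, h4, h5, h6⟩ := h
  rw [h1, List.map_map]
  refine List.map_congr_left (fun q hq => ?_)
  have hget : g.get? q.1 = some q.2 :=
    PySem.Dict.get?_of_mem_items g (show (q.1, q.2) ∈ g.items from hq) h5
  have hgd : g.getD q.1 [] = q.2 := PySem.Dict.getD_of_get?_eq_some g [] hget
  have hne : q.2 ≠ [] := h4 q hq
  have hnd : ∀ s ∈ q.2, List.Nodup s := h6 q hq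
  have hcond : ∀ v, decide (st.2.1.getD (q.1, v) 0 = st.1.getD q.1 0) =
      decide ((List.count v q.2.flatten : Nat) = q.2.length) := by
    intro v
    rw [h3, h2, hgd]
    simp
  show (q.1, PySem.Set.ofList (q.2.headI.filter (fun v =>
      decide (st.2.1.getD (q.1, v) 0 = st.1.getD q.1 0)))) = pvF q
  rw [List.filter_congr (fun v _ => hcond v), ← pv_count_filter q.2 hne hnd]
  have hndr : (pvReduceInter q.2).Nodup := by
    rw [pv_count_filter q.2 hne hnd]
    refine List.Nodup.filter _ ?_
    obtain ⟨s0, rest, hq2⟩ : ∃ a l, q.2 = a :: l := by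
      cases hq2 : q.2 with
      | nil => exact absurd hq2 hne
      | cons a l => exact ⟨a, l, rfl⟩
    rw [hq2]
    exact hnd s0 (hq2 ▸ List.mem_cons_self)
  rw [PySem.Set.ofList_eq_self_of_nodup _ hndr]
  rfl

-- ---- stitching the two programs together ----
theorem pv_defs_flat (policies : List String) (acc : List (String × List String)) :
    policies.foldl
      (fun defs ps => (((PySem.Str.split? ps ";").getD []).foldl pvStepB (PySem.Set.empty, defs)).2)
      acc =
    acc ++ policies.flatMap
      (fun ps => (((PySem.Str.split? ps ";").getD []).foldl pvTokB (PySem.Dict.mk [])).items) := by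
  induction policies generalizing acc with
  | nil => simp
  | cons ps rest ih =>
    simp only [List.foldl_cons, List.flatMap_cons]
    have hshift := pv_step_shift ((PySem.Str.split? ps ";").getD []) PySem.Set.empty acc []
    have hitems := pv_step_items ((PySem.Str.split? ps ";").getD []) PySem.Set.empty
      (PySem.Dict.mk []) (fun n => rfl)
    rw [show (PySem.Set.empty, acc) =
        ((PySem.Set.empty : PySem.Set String), acc ++ ([] : List (String × List String))) by simp,
      hshift]
    simp only at hitems ⊢
    rw [show ((((PySem.Str.split? ps ";").getD []).foldl pvStepB
        ((PySem.Set.empty : PySem.Set String), ([] : List (String × List String)))).2) =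
        ((((PySem.Str.split? ps ";").getD []).foldl pvTokB (PySem.Dict.mk [])).items) from hitems,
      ih, List.append_assoc]

theorem pv_inv_init : pvInv (PySem.Dict.mk [], PySem.Dict.mk [], PySem.Dict.mk [])
    (PySem.Dict.mk ([] : List (String × List (PySem.Set String)))) := by
  refine ⟨rfl, fun n => rfl, fun n v => rfl, ?_, ?_, ?_⟩
  · intro q hq; cases hq
  · simp [PySem.Dict.keys]
  · intro q hq; cases hq

theorem pv_main (policies : List String) :
    (policies.foldl (fun complete ps =>
        ((((PySem.Str.split? ps ";").getD []).foldl pvTokA (PySem.Dict.mk [])).items).foldl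
          pvMergeA complete) (PySem.Dict.mk [])).items =
    (let defs := policies.foldl
        (fun defs ps =>
          (((PySem.Str.split? ps ";").getD []).foldl pvStepB (PySem.Set.empty, defs)).2) [];
     let st := defs.foldl pvCount (PySem.Dict.mk [], PySem.Dict.mk [], PySem.Dict.mk []);
     st.2.2.items.map (fun p =>
        (p.1, PySem.Set.ofList (p.2.filter (fun v =>
          decide (st.2.1.getD (p.1, v) 0 = st.1.getD p.1 0)))))) := by
  simp only
  rw [pv_defs_flat policies [], List.nil_append]
  set allDefs := policies.flatMap
    (fun ps => (((PySem.Str.split? ps ";").getD []).foldl pvTokB (PySem.Dict.mk [])).items)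
    with hdefs
  have hA : policies.foldl (fun complete ps =>
        ((((PySem.Str.split? ps ";").getD []).foldl pvTokA (PySem.Dict.mk [])).items).foldl
          pvMergeA complete) (PySem.Dict.mk []) =
      allDefs.foldl pvMergeA (PySem.Dict.mk []) := by
    rw [hdefs, List.foldl_flatMap, pvTok_eq]
  have hnd : ∀ p ∈ allDefs, List.Nodup p.2 := by
    intro p hp
    rcases List.mem_flatMap.mp hp with ⟨ps, _, hmem⟩
    exact pv_tokB_nodup _ (PySem.Dict.mk []) (by intro q hq; cases hq) p hmem
  have hfold := pv_fold_merge_inv allDefs (PySem.Dict.mk [])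
    (PySem.Dict.mk ([] : List (String × List (PySem.Set String)))) rfl (by intro q hq; cases hq)
  have hinv := pv_count_fold allDefs
    (PySem.Dict.mk [], PySem.Dict.mk [], PySem.Dict.mk [])
    (PySem.Dict.mk ([] : List (String × List (PySem.Set String)))) hnd pv_inv_init
  rw [hA, hfold.1, ← pv_final _ _ hinv]

-- ===== VERDICT (by name: the statement is the Claim_ definition above) =====
set_option maxHeartbeats 1000000 in
theorem parse_csp_spec : Claim_equal_parse_csp := by
  intro s _
  unfold Spec_parse_csp parse_csp parse_csp_alt
  exact pv_main _
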